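-- pv_equiv track=rewrite | github.com/seo-dong-hyeon/Algorithm | 프로그래머스/연습문제/겹치는선분의길이.py | solution
-- ===== SOURCE A (Python) =====
-- def solution(lines):
--     answer = 0
--     prefix_sum = [0] * 210
--
--     # 체크 범위 조정
--     # -100 <= x <= 100 -> 0 <= x <= 200
--     for s, e in lines:
--         prefix_sum[s + 100] += 1
--         prefix_sum[e + 100] -= 1
--
--     for i in range(len(prefix_sum) - 1):
--         prefix_sum[i + 1] += prefix_sum[i]
--
--     for i in range(len(prefix_sum) - 1):
--         if prefix_sum[i] >= 2:
--             answer += 1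
--
--     return answer
-- ===== SOURCE B (Python) =====
-- def solution(lines):
--     # alternative: re-scan all segments at each integer position on the board (-100..100)
--     answer = 0
--     for p in range(-100, 101):
--         cov = 0
--         for s, e in lines:
--             if s <= p:
--                 cov += 1
--             if e <= p:
--                 cov -= 1
--         if cov >= 2:
--             answer += 1
--     return answer
-- ===== Notes on version B (the rewrite author's own statement) =====
-- stated objective: alternative
-- what changed: Replaces the 210-entry difference array with prefix-sum accumulation by a direct per-position rescan over the board -100..100, recounting net coverage over all segments at each position; Pre_ restricts inputs to the problem's stated coordinate domain [-100,100], outside which A raises IndexError or returns values produced by negative-index wraparound / its oversized 210-slot table.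
-- outside the precondition, e.g. on solution([(-150, -140), (-150, -140)]): A returns 10, B returns 0; on solution([(101, 105), (101, 105)]): A returns 4, B returns 0
import Mathlib
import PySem

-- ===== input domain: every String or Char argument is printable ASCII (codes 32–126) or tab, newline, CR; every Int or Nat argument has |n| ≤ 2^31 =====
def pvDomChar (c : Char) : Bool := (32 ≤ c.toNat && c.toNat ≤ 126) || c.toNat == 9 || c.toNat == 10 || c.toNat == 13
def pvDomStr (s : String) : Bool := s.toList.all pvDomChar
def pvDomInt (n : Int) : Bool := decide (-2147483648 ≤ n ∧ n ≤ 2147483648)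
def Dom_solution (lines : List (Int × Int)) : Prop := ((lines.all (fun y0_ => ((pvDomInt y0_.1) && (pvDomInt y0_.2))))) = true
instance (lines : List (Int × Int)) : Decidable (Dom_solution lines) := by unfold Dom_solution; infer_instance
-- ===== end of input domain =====

-- B rescans all segments at every board position -100..100 instead of building A's difference
-- array and prefix sums (alternative decomposition, not faster); equivalence is proved on Pre_.

-- ===== PORT A =====
-- prefix_sum[s+100] += 1 ; prefix_sum[e+100] -= 1
def stepA1 (ps : List Int) (se : Int × Int) : List Int :=
  let ps := PySem.List.pySetD ps (se.1 + 100) (PySem.List.pyGetD ps (se.1 + 100) 0 + 1)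
  PySem.List.pySetD ps (se.2 + 100) (PySem.List.pyGetD ps (se.2 + 100) 0 - 1)

-- prefix_sum[i+1] += prefix_sum[i]
def stepA2 (ps : List Int) (i : Int) : List Int :=
  PySem.List.pySetD ps (i + 1) (PySem.List.pyGetD ps (i + 1) 0 + PySem.List.pyGetD ps i 0)

def solution (lines : List (Int × Int)) : Int :=
  let ps : List Int := List.replicate 210 0
  let ps := lines.foldl stepA1 ps
  let ps := (PySem.List.pyRange 0 ((ps.length : Int) - 1) 1).foldl stepA2 ps
  (PySem.List.pyRange 0 ((ps.length : Int) - 1) 1).foldl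
    (fun answer i => if 2 ≤ PySem.List.pyGetD ps i 0 then answer + 1 else answer) 0

-- ===== PORT B =====
def solution_alt (lines : List (Int × Int)) : Int :=
  (PySem.List.pyRange (-100) 101 1).foldl (fun answer p =>
    let cov : Int := lines.foldl (fun (c : Int) se =>
      let c := if se.1 ≤ p then c + 1 else c
      if se.2 ≤ p then c - 1 else c) 0
    if 2 ≤ cov then answer + 1 else answer) 0

-- ===== PRECONDITION & SPEC =====
-- Pre_ restricts inputs to the problem's stated coordinate domain [-100,100] (A's own comment:
-- "-100 <= x <= 100"): outside it A either raises IndexError (coordinate ≥ 110 or ≤ -311) or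
-- returns a value produced by Python's silent negative-index wraparound or by scanning its
-- oversized 210-entry table — accidents of the table size, not values of the stated problem.
def Pre_solution (lines : List (Int × Int)) : Prop :=
  ∀ se ∈ lines, -100 ≤ se.1 ∧ se.1 ≤ 100 ∧ -100 ≤ se.2 ∧ se.2 ≤ 100

instance (lines : List (Int × Int)) : Decidable (Pre_solution lines) := by
  unfold Pre_solution; infer_instance

def pvWitness_solution : (List (Int × Int)) := [(0, 5), (3, 8)]

def Spec_solution (lines : List (Int × Int)) (out : Int) : Prop := out = solution_alt lines
instance (lines : List (Int × Int)) (out : Int) : Decidable (Spec_solution lines out) := by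
  unfold Spec_solution; infer_instance

-- ===== CLAIM (what is proved, stated in full; the proofs are below) =====
def Claim_equal_solution : Prop :=
  ∀ (lines : List (Int × Int)), Dom_solution lines → Pre_solution lines →
    Spec_solution lines (solution lines)

-- ===== LEMMAS AND PROOFS =====

-- the net coverage of one segment at position q, and the summed coverage of all segments
def covTerm (q : Int) (se : Int × Int) : Int :=
  (if se.1 ≤ q then 1 else 0) - (if se.2 ≤ q then 1 else 0)

def cov (lines : List (Int × Int)) (q : Int) : Int := (lines.map (covTerm q)).sum

-- the per-index difference value A's first loop accumulates at table index j
def dTerm (j : Int) (se : Int × Int) : Int :=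
  (if se.1 + 100 = j then 1 else 0) - (if se.2 + 100 = j then 1 else 0)

def dtbl (lines : List (Int × Int)) (j : Int) : Int := (lines.map (dTerm j)).sum

-- prefix sum of a table function over indices 0..j
def prefixF (f : Int → Int) (j : Int) : Int :=
  ((PySem.List.pyRange 0 (j + 1) 1).map f).sum

theorem sum_map_sub_int (xs : List Int) (f g : Int → Int) :
    (xs.map (fun x => f x - g x)).sum = (xs.map f).sum - (xs.map g).sum := by
  induction xs with
  | nil => simp
  | cons x xs ih => simp [ih]; ring

theorem covfold (lines : List (Int × Int)) (p : Int) : ∀ c : Int,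
    lines.foldl (fun c se =>
      if se.2 ≤ p then (if se.1 ≤ p then c + 1 else c) - 1
      else if se.1 ≤ p then c + 1 else c) c = c + cov lines p := by
  induction lines with
  | nil => intro c; simp [cov]
  | cons l ls ih =>
    intro c
    simp only [List.foldl_cons, ih, cov, List.map_cons, List.sum_cons, covTerm]
    split_ifs <;> ring

theorem length_stepA1 (ps : List Int) (se : Int × Int) : (stepA1 ps se).length = ps.length := by
  simp [stepA1, PySem.List.length_pySetD]

theorem length_foldA1 (lines : List (Int × Int)) : ∀ ps : List Int,
    (lines.foldl stepA1 ps).length = ps.length := by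
  induction lines with
  | nil => simp
  | cons l ls ih => intro ps; simp [List.foldl_cons, ih, length_stepA1]

theorem length_stepA2 (ps : List Int) (i : Int) : (stepA2 ps i).length = ps.length := by
  simp [stepA2, PySem.List.length_pySetD]

theorem length_foldA2 (r : List Int) : ∀ ps : List Int,
    (r.foldl stepA2 ps).length = ps.length := by
  induction r with
  | nil => simp
  | cons i rs ih => intro ps; simp [List.foldl_cons, ih, length_stepA2]

-- reading an in-range cell after an in-range assignment
theorem getD_setD (xs : List Int) (i m v : Int) (hi0 : 0 ≤ i)
    (hm0 : 0 ≤ m) (hm1 : m < xs.length) :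
    PySem.List.pyGetD (PySem.List.pySetD xs i v) m 0 =
      if m = i then v else PySem.List.pyGetD xs m 0 := by
  rw [PySem.List.pySetD_of_nonneg xs v hi0]
  rw [PySem.List.pyGetD_eq_getElem _ _ hm0 (by simpa using hm1),
      PySem.List.pyGetD_eq_getElem _ _ hm0 hm1]
  rw [List.getElem_set]
  split_ifs with h1 h2 h2 <;> first | rfl | omega

theorem stepA1_getD (ps : List Int) (se : Int × Int) (hlen : ps.length = 210)
    (hs : -100 ≤ se.1 ∧ se.1 ≤ 100 ∧ -100 ≤ se.2 ∧ se.2 ≤ 100)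
    (j : Int) (hj0 : 0 ≤ j) (hj1 : j < 210) :
    PySem.List.pyGetD (stepA1 ps se) j 0 = PySem.List.pyGetD ps j 0 + dTerm j se := by
  unfold stepA1
  rw [getD_setD _ _ _ _ (by omega) hj0 (by rw [PySem.List.length_pySetD]; omega),
      getD_setD _ _ _ _ (by omega) hj0 (by omega)]
  by_cases h12 : se.2 + 100 = se.1 + 100
  · rw [getD_setD _ _ _ _ (by omega) (by omega) (by omega)]
    simp only [dTerm]; split_ifs <;> (try subst_vars) <;> simp_all
  · rw [getD_setD _ _ _ _ (by omega) (by omega) (by omega)]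
    simp only [dTerm]; split_ifs <;> (try subst_vars) <;> simp_all <;> omega

theorem loop1_getD (lines : List (Int × Int)) : ∀ ps : List Int, ps.length = 210 →
    Pre_solution lines → ∀ j : Int, 0 ≤ j → j < 210 →
    PySem.List.pyGetD (lines.foldl stepA1 ps) j 0 = PySem.List.pyGetD ps j 0 + dtbl lines j := by
  induction lines with
  | nil => intro ps _ _ j _ _; simp [dtbl]
  | cons l ls ih =>
    intro ps hlen hpre j hj0 hj1
    rw [List.foldl_cons,
        ih (stepA1 ps l) (by rw [length_stepA1]; exact hlen)
          (fun se h => hpre se (List.mem_cons_of_mem _ h)) j hj0 hj1,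
        stepA1_getD ps l hlen (hpre l List.mem_cons_self) j hj0 hj1]
    simp [dtbl, dTerm]
    ring

theorem prefixF_succ (f : Int → Int) (j : Int) (hj : 0 ≤ j) :
    prefixF f (j + 1) = prefixF f j + f (j + 1) := by
  unfold prefixF
  rw [PySem.List.pyRange_one_succ_right (by omega)]
  simp

theorem prefixF_zero (f : Int → Int) : prefixF f 0 = f 0 := by
  have h : PySem.List.pyRange 0 1 1 = [0] := by decide
  simp [prefixF, h]

theorem stepA2_getD (ps : List Int) (i j : Int) (hi0 : 0 ≤ i)
    (hj0 : 0 ≤ j) (hj1 : j < ps.length) :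
    PySem.List.pyGetD (stepA2 ps i) j 0 =
      if j = i + 1 then PySem.List.pyGetD ps (i + 1) 0 + PySem.List.pyGetD ps i 0
      else PySem.List.pyGetD ps j 0 := by
  unfold stepA2
  rw [getD_setD _ _ _ _ (by omega) hj0 hj1]

theorem loop2_getD (ps : List Int) (hlen : ps.length = 210) : ∀ k : Nat, k ≤ 209 →
    ∀ j : Int, 0 ≤ j → j < 210 →
    PySem.List.pyGetD ((PySem.List.pyRange 0 (k : Int) 1).foldl stepA2 ps) j 0 =
      if j ≤ (k : Int) then prefixF (fun t => PySem.List.pyGetD ps t 0) j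
      else PySem.List.pyGetD ps j 0 := by
  intro k
  induction k with
  | zero =>
    intro _ j hj0 hj1
    rw [PySem.List.pyRange_one_eq_nil (by omega)]
    simp only [List.foldl_nil]
    split_ifs with h
    · have hj : j = 0 := by omega
      subst hj; rw [prefixF_zero]
    · rfl
  | succ k ih =>
    intro hk j hj0 hj1
    rw [show ((k + 1 : Nat) : Int) = (k : Int) + 1 by push_cast; ring,
        PySem.List.pyRange_one_succ_right (by positivity), List.foldl_append]
    simp only [List.foldl_cons, List.foldl_nil]
    rw [stepA2_getD _ _ _ (by positivity) hj0 (by rw [length_foldA2, hlen]; omega)]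
    by_cases h1 : j = (k : Int) + 1
    · rw [if_pos h1, ih (by omega) ((k : Int) + 1) (by positivity) (by omega),
          ih (by omega) (k : Int) (by positivity) (by omega), h1]
      rw [if_neg (by omega), if_pos (by omega), if_pos (by omega),
          prefixF_succ _ _ (by positivity)]
      ring
    · rw [if_neg h1, ih (by omega) j hj0 hj1]
      by_cases h2 : j ≤ (k : Int)
      · rw [if_pos h2, if_pos (by omega)]
      · rw [if_neg h2, if_neg (by omega)]

-- summed indicator over a range
theorem ind_sum (a lo hi : Int) :
    ((PySem.List.pyRange lo hi 1).map (fun t => if a = t then (1 : Int) else 0)).sum =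
      if lo ≤ a ∧ a < hi then 1 else 0 := by
  by_cases h : lo < hi
  · have hne : (hi - lo).toNat ≠ 0 := by omega
    obtain ⟨n, hn⟩ : ∃ n : Nat, (hi - lo).toNat = n := ⟨_, rfl⟩
    induction n generalizing lo with
    | zero => omega
    | succ n ih =>
      rw [PySem.List.pyRange_one_cons h, List.map_cons, List.sum_cons]
      by_cases h2 : lo + 1 < hi
      · rw [ih (lo + 1) h2 (by omega) (by omega)]
        split_ifs <;> omega
      · rw [PySem.List.pyRange_one_eq_nil (by omega)]
        simp only [List.map_nil, List.sum_nil]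
        split_ifs <;> omega
  · rw [PySem.List.pyRange_one_eq_nil (by omega)]
    simp only [List.map_nil, List.sum_nil]
    split_ifs with h1
    · omega
    · rfl

theorem prefixF_dTerm (l : Int × Int) (hl : -100 ≤ l.1 ∧ l.1 ≤ 100 ∧ -100 ≤ l.2 ∧ l.2 ≤ 100)
    (j : Int) : prefixF (fun t => dTerm t l) j = covTerm (j - 100) l := by
  unfold prefixF dTerm covTerm
  rw [sum_map_sub_int, ind_sum, ind_sum]
  have e1 : (0 ≤ l.1 + 100 ∧ l.1 + 100 < j + 1) ↔ l.1 ≤ j - 100 := by omega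
  have e2 : (0 ≤ l.2 + 100 ∧ l.2 + 100 < j + 1) ↔ l.2 ≤ j - 100 := by omega
  rw [if_congr e1 rfl rfl, if_congr e2 rfl rfl]

-- prefix sums of A's difference table are B's net coverages
theorem prefix_dtbl (lines : List (Int × Int)) (hpre : Pre_solution lines)
    (j : Int) : prefixF (dtbl lines) j = cov lines (j - 100) := by
  induction lines with
  | nil =>
    have h0 : dtbl [] = fun _ => (0 : Int) := by funext t; simp [dtbl]
    simp [prefixF, h0, cov]
  | cons l ls ih =>
    have hstep : prefixF (dtbl (l :: ls)) j
        = prefixF (fun t => dTerm t l) j + prefixF (dtbl ls) j := by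
      unfold prefixF
      rw [show (List.map (dtbl (l :: ls)) (PySem.List.pyRange 0 (j + 1) 1))
            = List.map (fun t => dTerm t l + dtbl ls t) (PySem.List.pyRange 0 (j + 1) 1) from
          List.map_congr_left (fun t _ => by simp [dtbl]),
        PySem.List.sum_map_add_int]
    rw [hstep, ih (fun se h => hpre se (List.mem_cons_of_mem _ h)),
        prefixF_dTerm l (hpre l List.mem_cons_self) j]
    simp [cov]

-- above the board (p ≥ 100), every segment of the domain contributes net 0 coverage
theorem cov_hi (lines : List (Int × Int)) (hpre : Pre_solution lines)
    (p : Int) (hp : 100 ≤ p) : cov lines p = 0 := by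
  induction lines with
  | nil => simp [cov]
  | cons l ls ih =>
    have hl := hpre l List.mem_cons_self
    simp only [cov, List.map_cons, List.sum_cons] at *
    rw [ih (fun se h => hpre se (List.mem_cons_of_mem _ h))]
    simp only [covTerm]
    rw [if_pos (by omega), if_pos (by omega)]
    ring

-- the two counting loops are the same count, reindexed by p = i - 100
theorem count_eq (F : Int → Int) :
    (PySem.List.pyRange 0 209 1).foldl (fun a i => if 2 ≤ F (i - 100) then a + 1 else a) (0 : Int)
      = (PySem.List.pyRange (-100) 109 1).foldl
          (fun a p => if 2 ≤ F p then a + 1 else a) (0 : Int) := by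
  rw [PySem.List.pyRange_one, PySem.List.pyRange_one]
  norm_num
  rw [List.foldl_map, List.foldl_map]
  refine PySem.List.foldl_congr_mem _ _ _ _ ?_
  intro acc k _
  have h : (k : Int) - 100 = -100 + (k : Int) := by ring
  rw [h]

-- the tail of A's scan (positions 101..108) counts nothing when coverage vanishes there
theorem count_tail (F : Int → Int) (hF : ∀ p : Int, 100 ≤ p → F p = 0) :
    (PySem.List.pyRange (-100) 109 1).foldl (fun a p => if 2 ≤ F p then a + 1 else a) (0 : Int)
      = (PySem.List.pyRange (-100) 101 1).foldl
          (fun a p => if 2 ≤ F p then a + 1 else a) (0 : Int) := by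
  rw [PySem.List.pyRange_one_append (-100) 101 109 (by omega) (by omega), List.foldl_append]
  have htail : ∀ (r : List Int), (∀ p ∈ r, 100 ≤ p) → ∀ acc : Int,
      r.foldl (fun a p => if 2 ≤ F p then a + 1 else a) acc = acc := by
    intro r
    induction r with
    | nil => intro _ acc; rfl
    | cons x xs ih =>
      intro hmem acc
      simp only [List.foldl_cons]
      rw [hF x (hmem x List.mem_cons_self), if_neg (by omega),
          ih (fun p h => hmem p (List.mem_cons_of_mem _ h))]
  exact htail _ (fun p hp => by
    rw [PySem.List.mem_pyRange_one] at hp; omega) _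

theorem solution_eq (lines : List (Int × Int)) (hpre : Pre_solution lines) :
    solution lines = solution_alt lines := by
  unfold solution solution_alt
  simp only [length_foldA1, length_foldA2, List.length_replicate]
  norm_num
  set ps1 := lines.foldl stepA1 (List.replicate 210 (0 : Int)) with hps1
  have hlen1 : ps1.length = 210 := by
    rw [hps1, length_foldA1, List.length_replicate]
  set ps2 := (PySem.List.pyRange 0 209 1).foldl stepA2 ps1 with hps2
  have hentry : ∀ i : Int, 0 ≤ i → i < 209 →
      PySem.List.pyGetD ps2 i 0 = cov lines (i - 100) := by
    intro i h0 h1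
    rw [hps2, show (209 : Int) = ((209 : Nat) : Int) by norm_num,
        loop2_getD ps1 hlen1 209 le_rfl i h0 (by omega), if_pos (by push_cast; omega)]
    have hcong : prefixF (fun t => PySem.List.pyGetD ps1 t 0) i = prefixF (dtbl lines) i := by
      unfold prefixF
      refine congrArg List.sum (List.map_congr_left ?_)
      intro t ht
      rw [PySem.List.mem_pyRange_one] at ht
      rw [hps1, loop1_getD lines _ (by rw [List.length_replicate]) hpre t (by omega) (by omega)]
      have hz : PySem.List.pyGetD (List.replicate 210 (0 : Int)) t 0 = 0 := by
        rw [PySem.List.pyGetD_eq_getElem _ _ (by omega)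
            (by rw [List.length_replicate]; push_cast; omega)]
        rw [List.getElem_replicate]
      rw [hz]; ring
    rw [hcong, prefix_dtbl lines hpre i]
  calc (PySem.List.pyRange 0 209 1).foldl
        (fun answer i => if 2 ≤ PySem.List.pyGetD ps2 i 0 then answer + 1 else answer) (0 : Int)
      = (PySem.List.pyRange 0 209 1).foldl
        (fun answer i => if 2 ≤ cov lines (i - 100) then answer + 1 else answer) (0 : Int) := by
        refine PySem.List.foldl_congr_mem _ _ _ _ ?_
        intro acc i hi
        rw [PySem.List.mem_pyRange_one] at hi
        rw [hentry i hi.1 hi.2]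
    _ = (PySem.List.pyRange (-100) 109 1).foldl
        (fun answer p => if 2 ≤ cov lines p then answer + 1 else answer) (0 : Int) :=
        count_eq (cov lines)
    _ = (PySem.List.pyRange (-100) 101 1).foldl
        (fun answer p => if 2 ≤ cov lines p then answer + 1 else answer) (0 : Int) :=
        count_tail (cov lines) (cov_hi lines hpre)
    _ = (PySem.List.pyRange (-100) 101 1).foldl (fun answer p =>
          if 2 ≤ lines.foldl (fun (c : Int) se =>
              if se.2 ≤ p then (if se.1 ≤ p then c + 1 else c) - 1
              else if se.1 ≤ p then c + 1 else c) 0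
          then answer + 1 else answer) (0 : Int) := by
        refine (PySem.List.foldl_congr_mem _ _ _ _ ?_)
        intro acc p _
        rw [covfold lines p 0, zero_add]

-- ===== VERDICT (by name: the statement is the Claim_ definition above) =====
theorem solution_spec : Claim_equal_solution := by
  intro lines _ hpre
  unfold Spec_solution
  exact solution_eq lines hpre
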